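-- pv_equiv track=rewrite | github.com/BEEmod/BEE2.4 | src/app/richTextBox.py | iter_firstlast
-- ===== SOURCE A (Python) =====
-- from typing import Iterable, Iterator, TypeVar, Union, Tuple, Dict, Callable
--
-- T = TypeVar('T')
--
-- def iter_firstlast(iterable: Iterable[T]) -> Iterator[Tuple[bool, T, bool]]:
--     """Iterate over anything, tracking if the value is the first or last one."""
--     it = iter(iterable)
--     try:
--         first = next(it)
--     except StopIteration:
--         return  # Empty.
--
--     try:
--         prev = next(it)
--     except StopIteration:
--         # Only one, special case.
--         yield True, first, True
--         return
--     # We now know there's at least two values,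
--     yield True, first, False
--
--     while True:
--         try:
--             current = next(it)
--         except StopIteration:
--             yield False, prev, True
--             break
--         yield False, prev, False
--         prev = current
-- ===== SOURCE B (Python) =====
-- def iter_firstlast(iterable):
--     """Iterate over anything, tracking if the value is the first or last one."""
--     items = list(iterable)
--     last = len(items) - 1
--     for i, x in enumerate(items):
--         yield i == 0, x, i == last
-- ===== Notes on version B (the rewrite author's own statement) =====
-- stated objective: alternative
-- what changed: Replaces A's streaming one-element-lookahead with StopIteration-driven special cases by a two-stage approach: materialize the iterable into a list, then derive is_first/is_last purely from each element's index compared with 0 and len-1.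
import Mathlib
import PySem

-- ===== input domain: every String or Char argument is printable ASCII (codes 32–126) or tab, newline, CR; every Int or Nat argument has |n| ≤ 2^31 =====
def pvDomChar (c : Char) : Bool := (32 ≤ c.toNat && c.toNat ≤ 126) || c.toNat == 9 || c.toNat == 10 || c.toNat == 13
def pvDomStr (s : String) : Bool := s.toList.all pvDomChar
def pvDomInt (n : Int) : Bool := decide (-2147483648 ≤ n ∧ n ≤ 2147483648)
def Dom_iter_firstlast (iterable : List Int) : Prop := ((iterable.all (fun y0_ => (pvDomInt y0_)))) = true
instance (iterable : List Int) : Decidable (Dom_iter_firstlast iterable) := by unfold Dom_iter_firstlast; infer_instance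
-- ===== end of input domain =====

-- B: materialize the input, then compute is_first/is_last from each index (i == 0, i == len-1) — no lookahead, no special cases.
-- ===== PORT A =====
-- A's trailing while-loop: yields (False, prev, False) each step; on exhaustion yields (False, prev, True).
def iterA_loop (prev : Int) : List Int → List (Bool × Int × Bool)
  | [] => [(false, prev, true)]
  | current :: rest => (false, prev, false) :: iterA_loop current rest

def iter_firstlast (iterable : List Int) : List (Bool × Int × Bool) :=
  match iterable with
  | [] => []                                   -- first next() raised: empty
  | [first] => [(true, first, true)]           -- second next() raised: single, special case
  | first :: prev :: rest => (true, first, false) :: iterA_loop prev rest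

-- ===== PORT B =====
-- B: items = list(iterable); last = len(items) - 1; for i, x in enumerate(items): yield i == 0, x, i == last
def iter_firstlast_alt (iterable : List Int) : List (Bool × Int × Bool) :=
  let items := iterable
  let last : Int := (items.length : Int) - 1
  (PySem.List.enumerate items).map (fun p => (decide (p.1 = 0), p.2, decide (p.1 = last)))

-- ===== PRECONDITION & SPEC =====
def Spec_iter_firstlast (iterable : List Int) (out : List (Bool × Int × Bool)) : Prop := out = iter_firstlast_alt iterable
instance (iterable : List Int) (out : List (Bool × Int × Bool)) : Decidable (Spec_iter_firstlast iterable out) := by unfold Spec_iter_firstlast; infer_instance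

-- ===== CLAIM (what is proved, stated in full; the proofs are below) =====
def Claim_equal_iter_firstlast : Prop := ∀ (iterable : List Int), Dom_iter_firstlast iterable → Spec_iter_firstlast iterable (iter_firstlast iterable)

-- ===== LEMMAS AND PROOFS =====
-- A's loop over the tail equals B's index-map over the corresponding enumerate segment.
theorem iterA_loop_eq_enum (prev : Int) (l : List Int) (i last : Int)
    (h1 : 1 ≤ i) (h2 : last = i + l.length) :
    iterA_loop prev l =
      (PySem.List.enumerate (prev :: l) i).map
        (fun p => (decide (p.1 = 0), p.2, decide (p.1 = last))) := by
  induction l generalizing prev i with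
  | nil =>
      simp [iterA_loop, PySem.List.enumerate_cons, PySem.List.enumerate_nil] at h2 ⊢
      constructor
      · omega
      · omega
  | cons c rest ih =>
      rw [PySem.List.enumerate_cons, List.map_cons]
      simp only [iterA_loop]
      have h2' : last = (i + 1) + (rest.length : Int) := by
        simp at h2; omega
      rw [← ih c (i + 1) (by omega) h2']
      simp
      constructor
      · omega
      · simp [h2']; omega

-- ===== VERDICT (by name: the statement is the Claim_ definition above) =====
theorem iter_firstlast_spec : Claim_equal_iter_firstlast := by
  intro iterable _
  unfold Spec_iter_firstlast iter_firstlast_alt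
  match iterable with
  | [] => rfl
  | [x] => simp [iter_firstlast, PySem.List.enumerate_cons, PySem.List.enumerate_nil]
  | x :: y :: rest =>
      simp only [iter_firstlast]
      rw [PySem.List.enumerate_cons, List.map_cons]
      simp only [zero_add]
      rw [← iterA_loop_eq_enum y rest 1 ((x :: y :: rest).length - 1) le_rfl (by simp; ring)]
      simp
      omega
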